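-- pv_equiv track=rewrite | github.com/samsohn28/advent_of_code | 2019/Day4/day4.py | has_repeat
-- ===== SOURCE A (Python) =====
-- def has_repeat(num):
--     start = 0
--     end = 1
--     while True:
--         if end >= len(num):
--             if end - start == 2:
--                 return True
--             return False
--         elif num[start] == num[end]:
--             end += 1
--         elif num[start] != num[end]:
--             if (end - start == 2):
--                 return True
--             start = end
--             end += 1
-- ===== SOURCE B (Python) =====
-- from itertools import groupby
--
-- def has_repeat(num):
--     return any(sum(1 for _ in g) == 2 for _, g in groupby(num))
-- ===== Notes on version B (the rewrite author's own statement) =====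
-- stated objective: idiomatic
-- what changed: Replaced the hand-written start/end pointer scan with itertools.groupby: split the string into maximal runs of equal characters and return whether any run has length exactly 2.
import Mathlib
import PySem

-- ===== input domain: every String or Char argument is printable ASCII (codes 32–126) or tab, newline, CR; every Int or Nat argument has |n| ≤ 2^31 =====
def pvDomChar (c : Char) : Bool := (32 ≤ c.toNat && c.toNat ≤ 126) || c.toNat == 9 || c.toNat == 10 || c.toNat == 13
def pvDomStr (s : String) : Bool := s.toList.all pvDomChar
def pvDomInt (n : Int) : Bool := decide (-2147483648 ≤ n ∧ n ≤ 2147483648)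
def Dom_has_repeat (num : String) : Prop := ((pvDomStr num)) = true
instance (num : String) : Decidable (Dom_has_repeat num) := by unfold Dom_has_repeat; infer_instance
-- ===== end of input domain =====

-- B replaces A's start/end pointer scan by an itertools.groupby run-length decomposition (idiomatic; same O(n) cost).

-- ===== PORT A =====
-- A's while loop: start/end are Nats (they begin at 0/1 and only grow); num[start], num[end]
-- are ported as List.get?: whenever they are evaluated both indices are nonnegative and the
-- equality/inequality test over Option Char matches Python's (num[start] is in range whenever
-- num[end] is, since start < end; if end is out of range the loop has already returned).
def hasRepeatLoop (cs : List Char) (start endI : Nat) : Bool :=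
  if _h : cs.length ≤ endI then
    endI - start == 2
  else if cs[start]? == cs[endI]? then
    hasRepeatLoop cs start (endI + 1)
  else if endI - start = 2 then
    true
  else
    hasRepeatLoop cs endI (endI + 1)
termination_by cs.length - endI

def has_repeat (num : String) : Bool := hasRepeatLoop num.toList 0 1

-- ===== PORT B =====
-- groupby num: maximal runs of equal adjacent characters; we keep (run length) per group.
def groupLens (c : Char) (n : Nat) : List Char → List Nat
  | [] => [n]
  | d :: rest => if d == c then groupLens c (n + 1) rest else n :: groupLens d 1 rest

def runLengths : List Char → List Nat
  | [] => []
  | c :: rest => groupLens c 1 rest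

def has_repeat_alt (num : String) : Bool := (runLengths num.toList).any (· == 2)

-- ===== PRECONDITION & SPEC =====
def Spec_has_repeat (num : String) (out : Bool) : Prop := out = has_repeat_alt num
instance (num : String) (out : Bool) : Decidable (Spec_has_repeat num out) := by unfold Spec_has_repeat; infer_instance

-- ===== CLAIM (what is proved, stated in full; the proofs are below) =====
def Claim_equal_has_repeat : Prop := ∀ (num : String), Dom_has_repeat num → Spec_has_repeat num (has_repeat num)

-- ===== LEMMAS AND PROOFS =====

-- common reference: scan the rest of the string carrying the current run's char and length,
-- reporting true as soon as a run of length exactly 2 is closed.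
def refScan (c : Char) (n : Nat) : List Char → Bool
  | [] => n == 2
  | d :: rest => if d == c then refScan c (n + 1) rest else ((n == 2) || refScan d 1 rest)

theorem groupLens_any (c : Char) (n : Nat) (l : List Char) :
    (groupLens c n l).any (· == 2) = refScan c n l := by
  induction l generalizing c n with
  | nil => simp [groupLens, refScan]
  | cons d rest ih =>
      by_cases h : d == c
      · simp [groupLens, refScan, h, ih]
      · simp [groupLens, refScan, h, ih]

theorem hasRepeatLoop_eq (cs : List Char) (start endI : Nat) (c : Char)
    (hs : cs[start]? = some c) (hse : start < endI) (hel : endI ≤ cs.length) :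
    hasRepeatLoop cs start endI = refScan c (endI - start) (cs.drop endI) := by
  induction h : cs.length - endI using Nat.strong_induction_on generalizing start endI c with
  | _ fuel ih =>
    rw [hasRepeatLoop]
    by_cases hend : cs.length ≤ endI
    · have he : endI = cs.length := le_antisymm hel hend
      simp [he, List.drop_length, refScan]
    · have hlt : endI < cs.length := by omega
      have hd : cs[endI]? = some cs[endI] := List.getElem?_eq_getElem hlt
      have hdrop : cs.drop endI = cs[endI] :: cs.drop (endI + 1) := by
        rw [List.drop_eq_getElem_cons hlt]
      by_cases heq : cs[endI] == c
      · have hopt : (cs[start]? == cs[endI]?) = true := by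
          simp [hs, hd]; exact (beq_iff_eq.mp heq).symm ▸ rfl
        rw [dif_neg hend, if_pos hopt]
        rw [ih (cs.length - (endI + 1)) (by omega) start (endI + 1) c hs (by omega) (by omega) rfl]
        rw [hdrop, refScan, if_pos heq]
        have : endI + 1 - start = endI - start + 1 := by omega
        rw [this]
      · have hopt : (cs[start]? == cs[endI]?) = false := by
          simp [hs, hd]
          intro hcc; exact absurd (beq_iff_eq.mpr hcc.symm) (by simp [heq])
        rw [dif_neg hend, if_neg (by simp [hopt])]
        rw [hdrop]
        rw [show refScan c (endI - start) (cs[endI] :: cs.drop (endI + 1))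
              = ((endI - start == 2) || refScan cs[endI] 1 (cs.drop (endI + 1))) from by
            rw [refScan, if_neg heq]]
        by_cases h2 : endI - start = 2
        · simp [h2]
        · rw [if_neg h2]
          have hrec := ih (cs.length - (endI + 1)) (by omega) endI (endI + 1) cs[endI] hd
            (by omega) (by omega) rfl
          have h1' : endI + 1 - endI = 1 := by omega
          rw [h1'] at hrec
          rw [hrec]
          simp [h2]

theorem hasRepeat_eq (num : String) : has_repeat num = has_repeat_alt num := by
  unfold has_repeat has_repeat_alt
  cases hcs : num.toList with
  | nil => simp [hasRepeatLoop, runLengths]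
  | cons c rest =>
      have h1 : (1 : Nat) ≤ (c :: rest).length := by simp
      rw [hasRepeatLoop_eq (c :: rest) 0 1 c (by simp) (by omega) h1]
      simp [runLengths, groupLens_any]

-- ===== VERDICT (by name: the statement is the Claim_ definition above) =====
theorem has_repeat_spec : Claim_equal_has_repeat := by
  intro num _
  unfold Spec_has_repeat
  exact hasRepeat_eq num
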